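-- pv_equiv track=rewrite | github.com/memedum90/TurkuazTurchese- | TurkuazTurchese - flaming/SEMEVAL/semalson/wordshape.py | wordShapeChris4Long
-- ===== SOURCE A (Python) =====
-- greek = ["alpha", "beta", "gamma", "delta", "epsilon", "zeta", "theta", "iota", "kappa", "lambda", "omicron", "rho", "sigma", "tau", "upsilon", "omega"]
--
-- def chris4equivalenceClass(c):
--
--     if c.isdigit():
--         return 'd'
--     elif c.islower():
--         return 'x'
--     elif c.isupper():
--         return 'X'
--     elif c==" ":
--         return 's'
--     elif c=="$":
--         return "$"
--     elif c=="+" or c=="=" or c=="<" or c==">":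
--         return "+"
--     elif c=="|" or c=="/" or c=="\\":
--         return "|"
--     elif c=="(" or c=="[" or c=="{":
--         return '('
--     elif c==")" or c=="]" or c=="}":
--         return ')'
--     elif c=="'"or c=="\"":
--         return "'"
--     elif c=="%":
--         return "%"
--     elif c=="?":
--         return "?"
--     elif c=="!":
--         return "!"
--     elif c==".":
--         return '.'
--     elif c=="," or c==":" or c==";":
--         return ","
--     elif c=="_" or c=="-":
--         return "_"
--     elif c=="#":
--         return "#"
--     elif c=="@":
--         return "@"
--     else:
--         return 'q'
--
-- boundsize=2
--
-- def wordShapeChris4Long(s,omitIfInBoundary,knownWords=None):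
--     sb=""
--     endSB=""
--     boundSet=[]
--     seenSet=[]
--     nonLetters=False
--
--     lenss=len(s)
--     i=0
--
--     while i<lenss:
--         c=s[i]
--         m=chris4equivalenceClass(c)
--         iIncr=0
--         for gr in greek:
--             if s[i].startswith(gr,i):
--                 m='g'
--                 iIncr=len(gr)-1
--                 break
--         if m!='x' and m!='X':
--             nonLetters=True
--         if i<boundsize:
--             sb=sb+m
--             boundSet.append(m)
--         elif i<len(s)-boundsize:
--             seenSet.append(m)
--         else:
--             boundSet.append(m)
--             endSB=endSB+m
--
--         i= i+ iIncr
--         i= i+1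
--
--     for c in seenSet:
--         if (not omitIfInBoundary) or (c not in boundSet):
--             sb=sb+c
--     sb=sb+endSB
--
--     #knownWords=set(words.words())
--     if knownWords:
--         if (not nonLetters) and (s in knownWords):
--             sb=sb+'k'
--
--
--     return sb
-- ===== SOURCE B (Python) =====
-- # B: build the class list once, then assemble by slicing; punctuation classes via a table.
-- _PUNCT = {' ': 's', '$': '$', '+': '+', '=': '+', '<': '+', '>': '+',
--           '|': '|', '/': '|', '\\': '|', '(': '(', '[': '(', '{': '(',
--           ')': ')', ']': ')', '}': ')', "'": "'", '"': "'", '%': '%',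
--           '?': '?', '!': '!', '.': '.', ',': ',', ':': ',', ';': ',',
--           '_': '_', '-': '_', '#': '#', '@': '@'}
--
-- def _cls(c):
--     if c.isdigit():
--         return 'd'
--     if c.islower():
--         return 'x'
--     if c.isupper():
--         return 'X'
--     return _PUNCT.get(c, 'q')
--
-- def wordShapeChris4Long(s, omitIfInBoundary, knownWords=None):
--     b = 2
--     classes = [_cls(c) for c in s]
--     front = classes[:b]
--     end = classes[max(b, len(s) - b):]
--     middle = classes[b:len(s) - b]
--     bound = front + end
--     sb = (''.join(front)
--           + ''.join(m for m in middle if not omitIfInBoundary or m not in bound)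
--           + ''.join(end))
--     if knownWords and all(m in ('x', 'X') for m in classes) and s in knownWords:
--         sb += 'k'
--     return sb
-- ===== Notes on version B (the rewrite author's own statement) =====
-- stated objective: simpler
-- what changed: B maps each character to its class once and assembles the shape from list slices (front/middle/end) with a filter and an all() check, using a dict table for punctuation classes, instead of A's index-while-loop that branches per index, accumulates five pieces of state via repeated string concatenation, and runs a dead 16-word greek-prefix scan per character.
import Mathlib
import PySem

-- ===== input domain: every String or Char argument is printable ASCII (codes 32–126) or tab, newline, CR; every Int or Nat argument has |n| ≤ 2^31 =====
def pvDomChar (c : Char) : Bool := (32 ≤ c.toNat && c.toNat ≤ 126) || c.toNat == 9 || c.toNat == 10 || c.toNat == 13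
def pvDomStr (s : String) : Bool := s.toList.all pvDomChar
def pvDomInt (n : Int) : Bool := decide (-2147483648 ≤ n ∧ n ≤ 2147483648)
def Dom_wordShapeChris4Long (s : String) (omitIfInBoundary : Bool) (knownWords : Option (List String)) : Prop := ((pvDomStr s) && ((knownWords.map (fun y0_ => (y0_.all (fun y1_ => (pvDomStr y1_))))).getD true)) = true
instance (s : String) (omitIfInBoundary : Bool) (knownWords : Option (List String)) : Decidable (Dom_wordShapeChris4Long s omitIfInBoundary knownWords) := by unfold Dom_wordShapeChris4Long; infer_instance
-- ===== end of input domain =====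

-- B builds the class list once and assembles the shape by slicing (with a table for the punctuation
-- classes) instead of A's index-while-loop with per-index boundary branching; objective: simpler.

-- ===== PORT A =====
def greek : List (List Char) :=
  ["alpha".toList, "beta".toList, "gamma".toList, "delta".toList, "epsilon".toList,
   "zeta".toList, "theta".toList, "iota".toList, "kappa".toList, "lambda".toList,
   "omicron".toList, "rho".toList, "sigma".toList, "tau".toList, "upsilon".toList, "omega".toList]

def chris4equivalenceClass (c : Char) : Char :=
  if PySem.Chars.isdigit c then 'd'
  else if PySem.Chars.islower c then 'x'
  else if PySem.Chars.isupper c then 'X'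
  else if c = ' ' then 's'
  else if c = '$' then '$'
  else if c = '+' ∨ c = '=' ∨ c = '<' ∨ c = '>' then '+'
  else if c = '|' ∨ c = '/' ∨ c = '\\' then '|'
  else if c = '(' ∨ c = '[' ∨ c = '{' then '('
  else if c = ')' ∨ c = ']' ∨ c = '}' then ')'
  else if c = '\'' ∨ c = '"' then '\''
  else if c = '%' then '%'
  else if c = '?' then '?'
  else if c = '!' then '!'
  else if c = '.' then '.'
  else if c = ',' ∨ c = ':' ∨ c = ';' then ','
  else if c = '_' ∨ c = '-' then '_'
  else if c = '#' then '#'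
  else if c = '@' then '@'
  else 'q'

def boundsize : Int := 2

-- s[i].startswith(gr, i): Python str.startswith with a start offset; exact for start ≥ 0
-- (A only calls it with i ≥ 0).
def pyStartswithFrom (t : List Char) (pre : List Char) (start : Int) : Bool :=
  pre.isPrefixOf (t.drop start.toNat)

-- the while loop of A, step for step; fuel = the number of remaining iterations (each step grows i
-- by ≥ 1, and at fuel 0 as at i ≥ lenss the current state is returned, so fuel = len(s) is exact).
def loopA (cs : List Char) (lenss : Int) :
    Nat → Int → List Char → List Char → List Char → List Char → Bool →
    (List Char × List Char × List Char × List Char × Bool)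
  | 0, _, sb, endSB, boundSet, seenSet, nl => (sb, endSB, boundSet, seenSet, nl)
  | fuel+1, i, sb, endSB, boundSet, seenSet, nl =>
    if i < lenss then
      match PySem.List.pyGet? cs i with
      | none => (sb, endSB, boundSet, seenSet, nl)   -- unreachable: 0 ≤ i < lenss
      | some c =>
        let m0 := chris4equivalenceClass c
        -- for gr in greek: if s[i].startswith(gr, i): m='g'; iIncr=len(gr)-1; break
        let mi : Char × Int :=
          match greek.find? (fun gr => pyStartswithFrom [c] gr i) with
          | some gr => ('g', (gr.length : Int) - 1)
          | none => (m0, 0)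
        let m := mi.1
        let iIncr := mi.2
        let nl := if m ≠ 'x' ∧ m ≠ 'X' then true else nl
        if i < boundsize then
          loopA cs lenss fuel (i + iIncr + 1) (sb ++ [m]) endSB (boundSet ++ [m]) seenSet nl
        else if i < lenss - boundsize then
          loopA cs lenss fuel (i + iIncr + 1) sb endSB boundSet (seenSet ++ [m]) nl
        else
          loopA cs lenss fuel (i + iIncr + 1) sb (endSB ++ [m]) (boundSet ++ [m]) seenSet nl
    else (sb, endSB, boundSet, seenSet, nl)

def wordShapeChris4Long (s : String) (omitIfInBoundary : Bool) (knownWords : Option (List String)) : String :=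
  let cs := s.toList
  let lenss : Int := cs.length
  let st := loopA cs lenss cs.length 0 [] [] [] [] false
  let sb := st.1
  let endSB := st.2.1
  let boundSet := st.2.2.1
  let seenSet := st.2.2.2.1
  let nonLetters := st.2.2.2.2
  let sb := seenSet.foldl
    (fun sb c => if !omitIfInBoundary || !(boundSet.contains c) then sb ++ [c] else sb) sb
  let sb := sb ++ endSB
  let sb :=
    match knownWords with
    | some kw => if kw ≠ [] then (if !nonLetters && kw.contains s then sb ++ ['k'] else sb) else sb
    | none => sb
  String.ofList sb

-- ===== PORT B =====
def punctTable : PySem.Dict Char Char :=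
  PySem.Dict.mk
    [(' ', 's'), ('$', '$'), ('+', '+'), ('=', '+'), ('<', '+'), ('>', '+'),
     ('|', '|'), ('/', '|'), ('\\', '|'), ('(', '('), ('[', '('), ('{', '('),
     (')', ')'), (']', ')'), ('}', ')'), ('\'', '\''), ('"', '\''), ('%', '%'),
     ('?', '?'), ('!', '!'), ('.', '.'), (',', ','), (':', ','), (';', ','),
     ('_', '_'), ('-', '_'), ('#', '#'), ('@', '@')]

def clsB (c : Char) : Char :=
  if PySem.Chars.isdigit c then 'd'
  else if PySem.Chars.islower c then 'x'
  else if PySem.Chars.isupper c then 'X'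
  else punctTable.getD c 'q'

def wordShapeChris4Long_alt (s : String) (omitIfInBoundary : Bool) (knownWords : Option (List String)) : String :=
  let b : Int := 2
  let classes := s.toList.map clsB
  let n : Int := classes.length
  let front := PySem.List.slice classes none (some b)
  let ende := PySem.List.slice classes (some (max b (n - b))) none
  let middle := PySem.List.slice classes (some b) (some (n - b))
  let bound := front ++ ende
  let sb := front ++ middle.filter (fun m => !omitIfInBoundary || !(bound.contains m)) ++ ende
  let sb :=
    if (match knownWords with | some kw => !kw.isEmpty | none => false)
        && classes.all (fun m => m == 'x' || m == 'X')
        && (match knownWords with | some kw => kw.contains s | none => false)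
    then sb ++ ['k'] else sb
  String.ofList sb

-- ===== PRECONDITION & SPEC =====
def Spec_wordShapeChris4Long (s : String) (omitIfInBoundary : Bool) (knownWords : Option (List String)) (out : String) : Prop := out = wordShapeChris4Long_alt s omitIfInBoundary knownWords
instance (s : String) (omitIfInBoundary : Bool) (knownWords : Option (List String)) (out : String) : Decidable (Spec_wordShapeChris4Long s omitIfInBoundary knownWords out) := by unfold Spec_wordShapeChris4Long; infer_instance

-- ===== CLAIM (what is proved, stated in full; the proofs are below) =====
def Claim_equal_wordShapeChris4Long : Prop := ∀ (s : String) (omitIfInBoundary : Bool) (knownWords : Option (List String)), Dom_wordShapeChris4Long s omitIfInBoundary knownWords → Spec_wordShapeChris4Long s omitIfInBoundary knownWords (wordShapeChris4Long s omitIfInBoundary knownWords)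

-- ===== LEMMAS AND PROOFS =====

-- A's if-chain of punctuation comparisons is B's table lookup
theorem cls_eq (c : Char) : chris4equivalenceClass c = clsB c := by
  unfold chris4equivalenceClass clsB
  by_cases hd : PySem.Chars.isdigit c = true
  · simp [hd]
  by_cases hl : PySem.Chars.islower c = true
  · simp [hd, hl]
  by_cases hu : PySem.Chars.isupper c = true
  · simp [hd, hl, hu]
  simp only [hd, hl, hu, if_false, Bool.false_eq_true]
  by_cases h0 : c = ' '
  · subst h0; decide
  by_cases h1 : c = '$'
  · subst h1; decide
  by_cases h2 : c = '+'
  · subst h2; decide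
  by_cases h3 : c = '='
  · subst h3; decide
  by_cases h4 : c = '<'
  · subst h4; decide
  by_cases h5 : c = '>'
  · subst h5; decide
  by_cases h6 : c = '|'
  · subst h6; decide
  by_cases h7 : c = '/'
  · subst h7; decide
  by_cases h8 : c = '\\'
  · subst h8; decide
  by_cases h9 : c = '('
  · subst h9; decide
  by_cases h10 : c = '['
  · subst h10; decide
  by_cases h11 : c = '{'
  · subst h11; decide
  by_cases h12 : c = ')'
  · subst h12; decide
  by_cases h13 : c = ']'
  · subst h13; decide
  by_cases h14 : c = '}'
  · subst h14; decide
  by_cases h15 : c = '\''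
  · subst h15; decide
  by_cases h16 : c = '"'
  · subst h16; decide
  by_cases h17 : c = '%'
  · subst h17; decide
  by_cases h18 : c = '?'
  · subst h18; decide
  by_cases h19 : c = '!'
  · subst h19; decide
  by_cases h20 : c = '.'
  · subst h20; decide
  by_cases h21 : c = ','
  · subst h21; decide
  by_cases h22 : c = ':'
  · subst h22; decide
  by_cases h23 : c = ';'
  · subst h23; decide
  by_cases h24 : c = '_'
  · subst h24; decide
  by_cases h25 : c = '-'
  · subst h25; decide
  by_cases h26 : c = '#'
  · subst h26; decide
  by_cases h27 : c = '@'
  · subst h27; decide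

  rw [PySem.Dict.getD_of_not_contains]
  · simp [*]
  simp only [punctTable, PySem.Dict.contains_mk, List.any_cons, List.any_nil,
    Bool.or_eq_false_iff, beq_eq_false_iff_ne]
  exact ⟨Ne.symm h0, Ne.symm h1, Ne.symm h2, Ne.symm h3, Ne.symm h4, Ne.symm h5,
    Ne.symm h6, Ne.symm h7, Ne.symm h8, Ne.symm h9, Ne.symm h10, Ne.symm h11,
    Ne.symm h12, Ne.symm h13, Ne.symm h14, Ne.symm h15, Ne.symm h16, Ne.symm h17,
    Ne.symm h18, Ne.symm h19, Ne.symm h20, Ne.symm h21, Ne.symm h22, Ne.symm h23,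
    Ne.symm h24, Ne.symm h25, Ne.symm h26, Ne.symm h27, trivial⟩

theorem prefix_short (a b : Char) (pre : List Char) (c : Char) (n : Nat) :
    (a :: b :: pre).isPrefixOf ([c].drop n) = false := by
  cases n <;> simp [List.isPrefixOf]

-- the greek loop in A is dead code: s[i] is a single character and every greek word is longer
theorem greek_none (c : Char) (i : Int) :
    greek.find? (fun gr => pyStartswithFrom [c] gr i) = none := by
  rw [List.find?_eq_none]
  intro gr hgr
  fin_cases hgr <;> simp [pyStartswithFrom, prefix_short]


-- the loop invariant: the final state as slices of the class list
theorem loopA_spec (cs : List Char) (fuel : Nat) :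
    ∀ (k : Nat) (sb endSB bnd seen : List Char) (nl : Bool), cs.length ≤ k + fuel →
    loopA cs (cs.length : Int) fuel (k : Int) sb endSB bnd seen nl =
      (sb ++ ((cs.map chris4equivalenceClass).take 2).drop k,
       endSB ++ (cs.map chris4equivalenceClass).drop (max k (max 2 (cs.length - 2))),
       bnd ++ ((cs.map chris4equivalenceClass).take 2).drop k
           ++ (cs.map chris4equivalenceClass).drop (max k (max 2 (cs.length - 2))),
       seen ++ ((cs.map chris4equivalenceClass).take (cs.length - 2)).drop (max k 2),
       nl || ((cs.map chris4equivalenceClass).drop k).any (fun m => !(m == 'x' || m == 'X'))) := by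
  induction fuel with
  | zero =>
    intro k sb endSB bnd seen nl hf
    have hk : cs.length ≤ k := by omega
    have e1 : ((cs.map chris4equivalenceClass).take 2).drop k = [] :=
      List.drop_eq_nil_of_le (by simp; omega)
    have e2 : (cs.map chris4equivalenceClass).drop (max k (max 2 (cs.length - 2))) = [] :=
      List.drop_eq_nil_of_le (by simp; omega)
    have e3 : ((cs.map chris4equivalenceClass).take (cs.length - 2)).drop (max k 2) = [] :=
      List.drop_eq_nil_of_le (by simp; omega)
    have e4 : (cs.map chris4equivalenceClass).drop k = [] :=
      List.drop_eq_nil_of_le (by simp; omega)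
    simp [loopA, e1, e2, e3, e4]
  | succ fuel ih =>
    intro k sb endSB bnd seen nl hf
    by_cases hk : k < cs.length
    · have hget : PySem.List.pyGet? cs (k : Int) = some (cs[k]'hk) := by
        simp [List.getElem?_eq_getElem hk]
      simp only [loopA]
      rw [if_pos (show ((k : Nat) : Int) < ((cs.length : Nat) : Int) by exact_mod_cast hk), hget]
      simp only [greek_none]
      have hcast : (k : Int) + 0 + 1 = ((k + 1 : Nat) : Int) := by push_cast; ring
      set L := cs.length with hL
      set classes := cs.map chris4equivalenceClass with hcl
      have hLcl : classes.length = L := by simp [hcl, hL]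
      set m := chris4equivalenceClass (cs[k]'hk) with hm
      have hdropk : classes.drop k = m :: classes.drop (k+1) := by
        rw [List.drop_eq_getElem_cons (by omega)]
        simp [hcl, hm]
      by_cases h2 : k < 2
      · rw [if_pos (show ((k : Nat) : Int) < boundsize by unfold boundsize; exact_mod_cast h2)]
        rw [hcast, ih (k+1) _ _ _ _ _ (by omega)]
        have hF : (classes.take 2).drop k = m :: (classes.take 2).drop (k+1) := by
          rw [List.drop_eq_getElem_cons (by simp [hLcl]; omega)]
          simp [hcl, hm, List.getElem_take]
        have hmax1 : max (k+1) (max 2 (L - 2)) = max k (max 2 (L - 2)) := by omega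
        have hmax2 : max (k+1) 2 = max k 2 := by omega
        simp [hF, hmax1, hmax2, hdropk]
        cases nl <;> by_cases hx : m = 'x' <;> by_cases hX : m = 'X' <;> simp [hx, hX]
      · by_cases h3 : k + 2 < L
        · rw [if_neg (show ¬ ((k : Nat) : Int) < boundsize by unfold boundsize; omega)]
          rw [if_pos (show ((k : Nat) : Int) < ((L : Nat) : Int) - boundsize by
            unfold boundsize; omega)]
          rw [hcast, ih (k+1) _ _ _ _ _ (by omega)]
          have hFk : (classes.take 2).drop k = [] :=
            List.drop_eq_nil_of_le (by simp [hLcl]; omega)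
          have hFk1 : (classes.take 2).drop (k+1) = [] :=
            List.drop_eq_nil_of_le (by simp [hLcl]; omega)
          have hmax1 : max (k+1) (max 2 (L - 2)) = max 2 (L - 2) := by omega
          have hmax1' : max k (max 2 (L - 2)) = max 2 (L - 2) := by omega
          have hM : (classes.take (L-2)).drop (max k 2) = m :: (classes.take (L-2)).drop (max (k+1) 2) := by
            rw [show max k 2 = k by omega, show max (k+1) 2 = k+1 by omega,
              List.drop_eq_getElem_cons (by simp [hLcl]; omega)]
            simp [hcl, hm, List.getElem_take]
          simp [hFk, hFk1, hmax1, hmax1', hM, (show max (k+1) 2 = k+1 by omega), hdropk]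
          cases nl <;> by_cases hx : m = 'x' <;> by_cases hX : m = 'X' <;> simp [hx, hX]
        · rw [if_neg (show ¬ ((k : Nat) : Int) < boundsize by unfold boundsize; omega)]
          rw [if_neg (show ¬ ((k : Nat) : Int) < ((L : Nat) : Int) - boundsize by
            unfold boundsize; omega)]
          rw [hcast, ih (k+1) _ _ _ _ _ (by omega)]
          have hFk : (classes.take 2).drop k = [] :=
            List.drop_eq_nil_of_le (by simp [hLcl]; omega)
          have hFk1 : (classes.take 2).drop (k+1) = [] :=
            List.drop_eq_nil_of_le (by simp [hLcl]; omega)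
          have hMk : (classes.take (L-2)).drop (max k 2) = [] :=
            List.drop_eq_nil_of_le (by simp [hLcl]; omega)
          have hMk1 : (classes.take (L-2)).drop (max (k+1) 2) = [] :=
            List.drop_eq_nil_of_le (by simp [hLcl]; omega)
          have hE : classes.drop (max k (max 2 (L - 2)))
              = m :: classes.drop (max (k+1) (max 2 (L - 2))) := by
            rw [show max k (max 2 (L-2)) = k by omega, show max (k+1) (max 2 (L-2)) = k+1 by omega]
            exact hdropk
          simp [hFk, hFk1, hMk, hMk1, hE, hdropk]
          cases nl <;> by_cases hx : m = 'x' <;> by_cases hX : m = 'X' <;> simp [hx, hX]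
    · simp only [loopA]
      rw [if_neg (show ¬ ((k : Nat) : Int) < ((cs.length : Nat) : Int) by exact_mod_cast hk)]
      have hk' : cs.length ≤ k := by omega
      have e1 : ((cs.map chris4equivalenceClass).take 2).drop k = [] :=
        List.drop_eq_nil_of_le (by simp; omega)
      have e2 : (cs.map chris4equivalenceClass).drop (max k (max 2 (cs.length - 2))) = [] :=
        List.drop_eq_nil_of_le (by simp; omega)
      have e3 : ((cs.map chris4equivalenceClass).take (cs.length - 2)).drop (max k 2) = [] :=
        List.drop_eq_nil_of_le (by simp; omega)
      have e4 : (cs.map chris4equivalenceClass).drop k = [] :=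
        List.drop_eq_nil_of_le (by simp; omega)
      simp [e1, e2, e3, e4]

theorem any_not_all (l : List Char) :
    (l.any fun m => !(m == 'x' || m == 'X')) = !l.all (fun m => m == 'x' || m == 'X') := by
  induction l with
  | nil => rfl
  | cons a t ih => simp only [List.any_cons, List.all_cons, ih, Bool.not_and]

-- classes[2 : n-2] as drop/take, for every length (a negative stop clamps to the empty slice)
theorem slice_middle (l : List Char) :
    PySem.List.slice l (some 2) (some ((l.length : Int) - 2)) = (l.drop 2).take (l.length - 4) := by
  match l with
  | [] => decide
  | [a] => simp [PySem.List.slice, PySem.List.clampIdx]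
  | a :: b :: t =>
    rw [PySem.List.slice_toNat (a::b::t) (show (0:Int) ≤ 2 by omega)
      (show (0:Int) ≤ ((a::b::t).length : Int) - 2 by simp; omega)]
    congr 1
    simp
    omega

-- ===== VERDICT (by name: the statement is the Claim_ definition above) =====
theorem wordShapeChris4Long_spec : Claim_equal_wordShapeChris4Long := by
  intro s omitIfInBoundary knownWords _dom
  unfold Spec_wordShapeChris4Long
  simp only [wordShapeChris4Long, wordShapeChris4Long_alt]
  rw [show (0 : Int) = ((0 : Nat) : Int) from rfl,
    loopA_spec s.toList s.toList.length 0 [] [] [] [] false (by omega)]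
  dsimp only
  have hmap : s.toList.map chris4equivalenceClass = s.toList.map clsB :=
    List.map_congr_left (fun c _ => cls_eq c)
  rw [hmap]
  set L := s.toList.length with hL
  set classes := s.toList.map clsB with hcl
  have hLcl : classes.length = L := by simp [hcl, hL]
  simp only [List.nil_append, List.drop_zero, Nat.zero_max]
  have hfront : PySem.List.slice classes none (some 2) = classes.take 2 := by
    rw [PySem.List.slice_to classes (by omega)]
    rfl
  have hende : PySem.List.slice classes (some (max 2 ((classes.length : Int) - 2))) none
      = classes.drop (max 2 (L - 2)) := by
    rw [PySem.List.slice_from classes (by omega)]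
    congr 1
    omega
  have hmid : PySem.List.slice classes (some 2) (some ((classes.length : Int) - 2))
      = (classes.take (L - 2)).drop 2 := by
    rw [slice_middle, List.drop_take, hLcl, show L - 2 - 2 = L - 4 by omega]
  rw [PySem.List.foldl_append_if
    (fun c => !omitIfInBoundary || !((classes.take 2 ++ classes.drop (max 2 (L - 2))).contains c))
    (fun c => c), List.map_id_fun', hfront, hende, hmid]
  have hall : ∀ t : Bool, (!(classes.any fun m => !(m == 'x' || m == 'X')) && t)
      = (classes.all (fun m => m == 'x' || m == 'X') && t) := by
    intro t
    congr 1
    rw [any_not_all]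
    simp
  match knownWords with
  | none => simp
  | some kw =>
    match kw with
    | [] => simp
    | w :: kws =>
      simp only [ne_eq, reduceCtorEq, not_false_eq_true, if_true, List.isEmpty_cons,
        Bool.not_false, Bool.true_and]
      rw [← hall]
      cases hany : classes.any fun m => !(m == 'x' || m == 'X') <;>
        cases hc : (w :: kws).contains s <;> simp [List.append_assoc]
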